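-- pv_equiv track=rewrite | github.com/kimyoungjin06/aoe_orch_control | scripts/gateway/aoe_tg_offdesk_flow.py | parse_replace_sync_flag
-- ===== SOURCE A (Python) =====
-- from typing import Any, Callable, Dict, List, Optional, Tuple
--
-- def parse_replace_sync_flag(tokens: List[str]) -> Optional[bool]:
--     result: Optional[bool] = None
--     for tok in tokens:
--         low = str(tok or "").strip().lower()
--         if low in {"replace-sync", "sync-replace", "replace_prefetch", "prefetch-replace"}:
--             result = True
--         elif low in {"no-replace-sync", "safe-sync", "no-sync-replace"}:
--             result = False
--     return result
-- ===== SOURCE B (Python) =====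
-- def parse_replace_sync_flag(tokens):
--     for tok in reversed(tokens):
--         low = str(tok or "").strip().lower()
--         if low in {"replace-sync", "sync-replace", "replace_prefetch", "prefetch-replace"}:
--             return True
--         if low in {"no-replace-sync", "safe-sync", "no-sync-replace"}:
--             return False
--     return None
-- ===== Notes on version B (the rewrite author's own statement) =====
-- stated objective: alternative
-- what changed: Replaces the forward full-scan accumulator (last write wins) with a reverse scan that returns at the first matching token, scanning only the suffix after the last flag.
import Mathlib
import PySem

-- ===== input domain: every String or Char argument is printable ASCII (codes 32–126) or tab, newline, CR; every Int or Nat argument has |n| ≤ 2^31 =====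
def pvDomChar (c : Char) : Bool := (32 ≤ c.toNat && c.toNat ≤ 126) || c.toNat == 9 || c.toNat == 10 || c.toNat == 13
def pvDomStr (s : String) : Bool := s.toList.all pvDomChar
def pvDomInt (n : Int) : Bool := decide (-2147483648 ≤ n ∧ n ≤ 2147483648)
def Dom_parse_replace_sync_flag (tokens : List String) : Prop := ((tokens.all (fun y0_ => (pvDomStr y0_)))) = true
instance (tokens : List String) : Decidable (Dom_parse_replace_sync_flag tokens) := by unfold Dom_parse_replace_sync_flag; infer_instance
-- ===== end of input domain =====

-- ===== PORT A =====
-- Re-implementation note: B scans reversed(tokens) and returns at the first flag token;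
-- A scans forward keeping a last-write-wins accumulator. Return values proved equal.
def pvNorm (tok : String) : String :=
  PySem.Str.lower (PySem.Str.strip (if tok == "" then "" else tok))

def pvIsTrue (low : String) : Bool :=
  low == "replace-sync" || low == "sync-replace" || low == "replace_prefetch" || low == "prefetch-replace"

def pvIsFalse (low : String) : Bool :=
  low == "no-replace-sync" || low == "safe-sync" || low == "no-sync-replace"

def parse_replace_sync_flag (tokens : List String) : Option Bool :=
  tokens.foldl (fun result tok =>
    if pvIsTrue (pvNorm tok) then some true
    else if pvIsFalse (pvNorm tok) then some false
    else result) none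

-- ===== PORT B =====
def pvAltGo : List String → Option Bool
  | [] => none
  | tok :: rest =>
    if pvIsTrue (pvNorm tok) then some true
    else if pvIsFalse (pvNorm tok) then some false
    else pvAltGo rest

def parse_replace_sync_flag_alt (tokens : List String) : Option Bool :=
  pvAltGo tokens.reverse

-- ===== PRECONDITION & SPEC =====
def Spec_parse_replace_sync_flag (tokens : List String) (out : Option Bool) : Prop := out = parse_replace_sync_flag_alt tokens
instance (tokens : List String) (out : Option Bool) : Decidable (Spec_parse_replace_sync_flag tokens out) := by unfold Spec_parse_replace_sync_flag; infer_instance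

-- ===== CLAIM =====
def Claim_equal_parse_replace_sync_flag : Prop := ∀ (tokens : List String), Dom_parse_replace_sync_flag tokens → Spec_parse_replace_sync_flag tokens (parse_replace_sync_flag tokens)

-- ===== LEMMAS AND PROOFS =====
def pvStep (tok : String) : Option Bool :=
  if pvIsTrue (pvNorm tok) then some true
  else if pvIsFalse (pvNorm tok) then some false
  else none

theorem pvStep_or (t : String) (acc : Option Bool) :
    (if pvIsTrue (pvNorm t) then some true
     else if pvIsFalse (pvNorm t) then some false
     else acc) = (pvStep t).or acc := by
  unfold pvStep; split_ifs <;> rfl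

theorem pvAltGo_append_single (xs : List String) (t : String) :
    pvAltGo (xs ++ [t]) = (pvAltGo xs).or (pvStep t) := by
  induction xs with
  | nil => simp only [List.nil_append, pvAltGo, pvStep, Option.or]
  | cons h rest ih =>
    simp only [List.cons_append, pvAltGo, ih]
    split_ifs <;> rfl

theorem pvFoldl_eq (tokens : List String) (acc : Option Bool) :
    tokens.foldl (fun result tok =>
      if pvIsTrue (pvNorm tok) then some true
      else if pvIsFalse (pvNorm tok) then some false
      else result) acc = (pvAltGo tokens.reverse).or acc := by
  induction tokens generalizing acc with
  | nil => simp [pvAltGo]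
  | cons t rest ih =>
    rw [List.foldl_cons, ih, List.reverse_cons, pvAltGo_append_single,
        pvStep_or, ← Option.or_assoc]

-- ===== VERDICT =====
theorem parse_replace_sync_flag_spec : Claim_equal_parse_replace_sync_flag := by
  intro tokens _
  unfold Spec_parse_replace_sync_flag parse_replace_sync_flag parse_replace_sync_flag_alt
  rw [pvFoldl_eq]
  exact Option.or_none
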